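-- pv_equiv track=rewrite | github.com/jto6/knowledgebase-indexer | word_filter.py | _are_word_variations
-- ===== SOURCE A (Python) =====
-- def _are_word_variations(word1: str, word2: str) -> bool:
--     """Check if two words are variations of each other."""
--     # Check for common suffix variations
--     suffixes = ['ing', 'ed', 'er', 'est', 'ly', 'tion', 'sion', 'ment', 'ful', 'less', 'able', 'ible']
--
--     for suffix in suffixes:
--         if word1.endswith(suffix) and word2 == word1[:-len(suffix)]:
--             return True
--         if word2.endswith(suffix) and word1 == word2[:-len(suffix)]:
--             return True
--
--     return False
-- ===== SOURCE B (Python) =====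
-- _SUFFIXES = frozenset(['ing', 'ed', 'er', 'est', 'ly', 'tion', 'sion',
--                        'ment', 'ful', 'less', 'able', 'ible'])
--
--
-- def _are_word_variations(word1: str, word2: str) -> bool:
--     """Check if two words are variations of each other."""
--     if word1.startswith(word2) and word1[len(word2):] in _SUFFIXES:
--         return True
--     if word2.startswith(word1) and word2[len(word1):] in _SUFFIXES:
--         return True
--     return False
-- ===== Notes on version B (the rewrite author's own statement) =====
-- stated objective: simpler
-- what changed: Instead of scanning all 12 suffixes and slicing per suffix, B tests the prefix relation once in each direction and does a single set-membership lookup on the residual word1[len(word2):].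
import Mathlib
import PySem

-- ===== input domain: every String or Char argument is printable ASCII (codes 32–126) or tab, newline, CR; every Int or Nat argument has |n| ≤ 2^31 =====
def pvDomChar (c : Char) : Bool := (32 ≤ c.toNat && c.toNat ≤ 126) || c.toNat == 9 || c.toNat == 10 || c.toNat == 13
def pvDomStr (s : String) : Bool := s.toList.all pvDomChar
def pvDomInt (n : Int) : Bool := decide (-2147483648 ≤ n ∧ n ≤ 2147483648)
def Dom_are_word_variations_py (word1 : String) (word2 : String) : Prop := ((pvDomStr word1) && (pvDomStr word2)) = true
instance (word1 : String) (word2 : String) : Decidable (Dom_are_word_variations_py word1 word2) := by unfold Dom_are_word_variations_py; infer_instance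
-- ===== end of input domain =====

-- B replaces A's scan over all 12 suffixes by computing the single candidate residual
-- via a prefix test and one set-membership lookup (objective: simpler/idiomatic).

-- ===== PORT A =====
def pvSuffixes : List String :=
  ["ing", "ed", "er", "est", "ly", "tion", "sion", "ment", "ful", "less", "able", "ible"]

def pvLoopA (word1 word2 : String) : List String → Bool
  | [] => false
  | suffix :: rest =>
    if PySem.Str.endswith word1 suffix
        && (word2 == PySem.Str.slice word1 none (some (-(PySem.Str.len suffix)))) then true
    else if PySem.Str.endswith word2 suffix
        && (word1 == PySem.Str.slice word2 none (some (-(PySem.Str.len suffix)))) then true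
    else pvLoopA word1 word2 rest

def are_word_variations_py (word1 : String) (word2 : String) : Bool :=
  pvLoopA word1 word2 pvSuffixes

-- ===== PORT B =====
def pvSuffixSet : PySem.Set String :=
  PySem.Set.ofList ["ing", "ed", "er", "est", "ly", "tion", "sion", "ment", "ful", "less", "able", "ible"]

def are_word_variations_py_alt (word1 : String) (word2 : String) : Bool :=
  if PySem.Str.startswith word1 word2
      && PySem.Set.contains pvSuffixSet (PySem.Str.slice word1 (some (PySem.Str.len word2)) none) then true
  else if PySem.Str.startswith word2 word1
      && PySem.Set.contains pvSuffixSet (PySem.Str.slice word2 (some (PySem.Str.len word1)) none) then true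
  else false

-- ===== PRECONDITION & SPEC =====
def Spec_are_word_variations_py (word1 : String) (word2 : String) (out : Bool) : Prop := out = are_word_variations_py_alt word1 word2
instance (word1 : String) (word2 : String) (out : Bool) : Decidable (Spec_are_word_variations_py word1 word2 out) := by unfold Spec_are_word_variations_py; infer_instance

-- ===== CLAIM (what is proved, stated in full; the proofs are below) =====
def Claim_equal_are_word_variations_py : Prop := ∀ (word1 : String) (word2 : String), Dom_are_word_variations_py word1 word2 → Spec_are_word_variations_py word1 word2 (are_word_variations_py word1 word2)

-- ===== LEMMAS AND PROOFS =====

-- one A-loop-body check for a fixed suffix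
def pvCondA (a b s : String) : Bool :=
  PySem.Str.endswith a s && (b == PySem.Str.slice a none (some (-(PySem.Str.len s))))

theorem pvLoopA_eq_any (w1 w2 : String) (l : List String) :
    pvLoopA w1 w2 l = l.any (fun s => pvCondA w1 w2 s || pvCondA w2 w1 s) := by
  induction l with
  | nil => rfl
  | cons s rest ih =>
    simp only [pvLoopA, List.any_cons, Bool.if_true_left, Bool.decide_coe, ih, pvCondA,
      Bool.or_assoc]

-- A's per-suffix check says exactly "a = b ++ s" (for a nonempty suffix)
theorem pvCondA_iff (a b s : String) (hs : s.toList ≠ []) :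
    pvCondA a b s = true ↔ a.toList = b.toList ++ s.toList := by
  have hlen : 0 < s.toList.length := List.length_pos_iff.mpr hs
  constructor
  · rintro h
    simp only [pvCondA, Bool.and_eq_true, beq_iff_eq] at h
    obtain ⟨hend, heq⟩ := h
    rw [PySem.Str.endswith_eq, PySem.Chars.endswith_iff] at hend
    obtain ⟨p, hp⟩ := hend
    have hb : b.toList = (PySem.Str.slice a none (some (-(PySem.Str.len s)))).toList := by rw [heq]
    rw [PySem.Str.toList_slice, PySem.Chars.slice_eq_listSlice, PySem.Str.len_eq] at hb
    rw [PySem.List.slice_to_neg_natCast _ _ hlen] at hb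
    have : a.toList.take (a.toList.length - s.toList.length) = p := by
      rw [← hp]; simp [List.take_left']
    rw [this] at hb
    rw [hb, hp]
  · intro h
    have hb : b.toList = (PySem.Str.slice a none (some (-(PySem.Str.len s)))).toList := by
      rw [PySem.Str.toList_slice, PySem.Chars.slice_eq_listSlice, PySem.Str.len_eq,
        PySem.List.slice_to_neg_natCast _ _ hlen, h]
      simp
    simp only [pvCondA, Bool.and_eq_true, beq_iff_eq]
    constructor
    · rw [PySem.Str.endswith_eq, PySem.Chars.endswith_iff, h]
      exact ⟨b.toList, rfl⟩
    · exact String.toList_inj.mp hb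

-- B's per-direction check says exactly "∃ s ∈ pvSuffixes, a = b ++ s"
theorem pvCondB_iff (a b : String) :
    (PySem.Str.startswith a b
      && PySem.Set.contains pvSuffixSet (PySem.Str.slice a (some (PySem.Str.len b)) none)) = true
    ↔ ∃ s ∈ pvSuffixes, a.toList = b.toList ++ s.toList := by
  have hres : (PySem.Str.slice a (some (PySem.Str.len b)) none).toList
      = a.toList.drop b.toList.length := by
    rw [PySem.Str.toList_slice, PySem.Chars.slice_eq_listSlice, PySem.Str.len_eq]
    exact PySem.List.slice_from_natCast _ _
  have hmem : ∀ r : String, PySem.Set.contains pvSuffixSet r = true ↔ r ∈ pvSuffixes := by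
    intro r
    have : (pvSuffixSet : List String) = pvSuffixes := by decide
    simp [PySem.Set.contains, this]
  constructor
  · rintro h
    simp only [Bool.and_eq_true] at h
    obtain ⟨hpre, hcon⟩ := h
    rw [PySem.Str.startswith_eq, PySem.Chars.startswith_iff] at hpre
    obtain ⟨t, ht⟩ := hpre
    refine ⟨PySem.Str.slice a (some (PySem.Str.len b)) none, (hmem _).mp hcon, ?_⟩
    rw [hres, ← ht]
    simp
  · rintro ⟨s, hsmem, hs⟩
    simp only [Bool.and_eq_true]
    constructor
    · rw [PySem.Str.startswith_eq, PySem.Chars.startswith_iff, hs]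
      exact ⟨s.toList, rfl⟩
    · have : (PySem.Str.slice a (some (PySem.Str.len b)) none).toList = s.toList := by
        rw [hres, hs]; simp
      rw [hmem, String.toList_inj.mp this]
      exact hsmem

theorem pvSuffixes_nonempty : ∀ s ∈ pvSuffixes, s.toList ≠ [] := by decide

-- ===== VERDICT (by name: the statement is the Claim_ definition above) =====
theorem are_word_variations_py_spec : Claim_equal_are_word_variations_py := by
  intro w1 w2 _
  show are_word_variations_py w1 w2 = are_word_variations_py_alt w1 w2
  rw [Bool.eq_iff_iff]
  have hA : are_word_variations_py w1 w2 = true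
      ↔ (∃ s ∈ pvSuffixes, w1.toList = w2.toList ++ s.toList)
        ∨ (∃ s ∈ pvSuffixes, w2.toList = w1.toList ++ s.toList) := by
    rw [are_word_variations_py, pvLoopA_eq_any, List.any_eq_true]
    constructor
    · rintro ⟨s, hsmem, hs⟩
      rcases Bool.or_eq_true_iff.mp hs with h | h
      · exact Or.inl ⟨s, hsmem, (pvCondA_iff _ _ _ (pvSuffixes_nonempty s hsmem)).mp h⟩
      · exact Or.inr ⟨s, hsmem, (pvCondA_iff _ _ _ (pvSuffixes_nonempty s hsmem)).mp h⟩
    · rintro (⟨s, hsmem, hs⟩ | ⟨s, hsmem, hs⟩)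
      · exact ⟨s, hsmem, Bool.or_eq_true_iff.mpr (Or.inl ((pvCondA_iff _ _ _ (pvSuffixes_nonempty s hsmem)).mpr hs))⟩
      · exact ⟨s, hsmem, Bool.or_eq_true_iff.mpr (Or.inr ((pvCondA_iff _ _ _ (pvSuffixes_nonempty s hsmem)).mpr hs))⟩
  have hB : are_word_variations_py_alt w1 w2 = true
      ↔ (∃ s ∈ pvSuffixes, w1.toList = w2.toList ++ s.toList)
        ∨ (∃ s ∈ pvSuffixes, w2.toList = w1.toList ++ s.toList) := by
    rw [are_word_variations_py_alt]
    split_ifs with h1 h2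
    · simp only [true_iff]; exact Or.inl ((pvCondB_iff w1 w2).mp h1)
    · simp only [true_iff]; exact Or.inr ((pvCondB_iff w2 w1).mp h2)
    · simp only [false_iff]
      rintro (hc | hc)
      · exact h1 ((pvCondB_iff w1 w2).mpr hc)
      · exact h2 ((pvCondB_iff w2 w1).mpr hc)
  rw [hA, hB]
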